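-- pv_equiv track=rewrite | github.com/AureusInvictus/AureusEngine | AureusEngine Full Beta Deployment/modules/m_tier_logic.py | classify_result
-- ===== SOURCE A (Python) =====
-- QUALITY_SCORES = {"P": 1, "C": 2, "R": 3, "X": 4, "E": 5, "Y": 6}
--
-- def classify_result(materials, result_quality):
--     values = sorted(QUALITY_SCORES[q] for q in materials)
--     min_val, max_val = values[0], values[-1]
--     result_score = QUALITY_SCORES[result_quality]
--
--     if result_score == max_val:
--         return "W"
--     elif result_score == min_val and all(q == "P" for q in materials):
--         return "W"
--     elif result_score == min_val:
--         return "L"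
--     else:
--         mid_index = values.index(result_score) if result_score in values else -1
--         return f"M{mid_index + 1}" if mid_index != -1 else "M?"
-- ===== SOURCE B (Python) =====
-- QUALITY_SCORES = {"P": 1, "C": 2, "R": 3, "X": 4, "E": 5, "Y": 6}
--
-- def classify_result(materials, result_quality):
--     scores = [QUALITY_SCORES[q] for q in materials]
--     min_val = max_val = scores[0]
--     result_score = QUALITY_SCORES[result_quality]
--     count_less = 0
--     found = False
--     for s in scores:
--         if s < min_val:
--             min_val = s
--         if s > max_val:
--             max_val = s
--         if s < result_score:
--             count_less += 1
--         if s == result_score: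
--             found = True
--     if result_score == max_val:
--         return "W"
--     if result_score == min_val and all(q == "P" for q in materials):
--         return "W"
--     if result_score == min_val:
--         return "L"
--     return "M{}".format(count_less + 1) if found else "M?"
-- ===== Notes on version B (the rewrite author's own statement) =====
-- stated objective: faster
-- what changed: B replaces A's sort of the score list plus a separate membership test and list.index scan by a single pass that tracks min, max, found and the count of strictly smaller scores (which equals the first-occurrence index in the sorted list).
import Mathlib
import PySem

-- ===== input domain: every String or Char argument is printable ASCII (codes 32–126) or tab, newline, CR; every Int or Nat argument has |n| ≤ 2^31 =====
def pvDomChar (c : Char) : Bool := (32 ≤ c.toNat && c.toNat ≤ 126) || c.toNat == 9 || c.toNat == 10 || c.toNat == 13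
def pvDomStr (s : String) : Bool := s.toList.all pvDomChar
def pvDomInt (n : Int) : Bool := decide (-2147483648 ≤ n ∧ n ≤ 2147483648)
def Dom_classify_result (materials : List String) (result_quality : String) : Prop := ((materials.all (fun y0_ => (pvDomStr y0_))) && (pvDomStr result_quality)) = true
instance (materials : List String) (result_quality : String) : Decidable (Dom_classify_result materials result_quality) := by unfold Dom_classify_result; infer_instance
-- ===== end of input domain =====

-- B replaces A's sort + list.index scan by a single pass over the scores keeping
-- min/max/count-of-smaller/found accumulators (the mid index is the count of strictly
-- smaller scores); return value only, neither version mutates its arguments.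

-- QUALITY_SCORES and the 'QUALITY_SCORES[q] for q in materials' extraction (KeyError = none), shared context of both versions
def QUALITY_SCORES : PySem.Dict String Int :=
  PySem.Dict.ofList [("P", 1), ("C", 2), ("R", 3), ("X", 4), ("E", 5), ("Y", 6)]

def scoresOf? (l : List String) : Option (List Int) :=
  match l with
  | [] => some []
  | q :: rest =>
    match QUALITY_SCORES.get? q, scoresOf? rest with
    | some v, some vs => some (v :: vs)
    | _, _ => none

-- ===== PORT A =====
def classify_result (materials : List String) (result_quality : String) : String :=
  match scoresOf? materials with
  | none => ""  -- KeyError: excluded by Pre_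
  | some raw =>
    let values := PySem.List.sorted raw (fun x => x) false
    match PySem.List.pyGet? values 0, PySem.List.pyGet? values (-1) with
    | some min_val, some max_val =>
      match QUALITY_SCORES.get? result_quality with
      | none => ""  -- KeyError: excluded by Pre_
      | some result_score =>
        if result_score == max_val then "W"
        else if result_score == min_val && materials.all (fun q => q == "P") then "W"
        else if result_score == min_val then "L"
        else
          let mid_index : Int :=
            if values.contains result_score then
              ((PySem.List.index? values result_score).getD 0 : Nat) else -1
          if mid_index != -1 then "M" ++ PySem.Int.toStr (mid_index + 1) else "M?"
    | _, _ => ""  -- IndexError on values[0]/values[-1]: excluded by Pre_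

-- ===== PORT B =====
def classify_result_alt (materials : List String) (result_quality : String) : String :=
  match scoresOf? materials with
  | none => ""  -- KeyError: excluded by Pre_
  | some scores =>
    match scores with
    | [] => ""  -- IndexError on scores[0]: excluded by Pre_
    | s0 :: _ =>
      match QUALITY_SCORES.get? result_quality with
      | none => ""  -- KeyError: excluded by Pre_
      | some r =>
        let st := scores.foldl
          (fun (st : Int × Int × Int × Bool) s =>
            (if s < st.1 then s else st.1,
             if s > st.2.1 then s else st.2.1,
             if s < r then st.2.2.1 + 1 else st.2.2.1,
             if s == r then true else st.2.2.2))
          (s0, s0, 0, false)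
        if r == st.2.1 then "W"
        else if r == st.1 && materials.all (fun q => q == "P") then "W"
        else if r == st.1 then "L"
        else if st.2.2.2 then "M" ++ PySem.Int.toStr (st.2.2.1 + 1) else "M?"

-- ===== PRECONDITION & SPEC =====
-- Pre_ excludes exactly the raising inputs: empty materials (IndexError) and any
-- quality string outside QUALITY_SCORES (KeyError).
def Pre_classify_result (materials : List String) (result_quality : String) : Prop :=
  materials ≠ [] ∧ (∀ q ∈ materials, (QUALITY_SCORES.get? q).isSome = true) ∧
    (QUALITY_SCORES.get? result_quality).isSome = true
instance (materials : List String) (result_quality : String) : Decidable (Pre_classify_result materials result_quality) := by unfold Pre_classify_result; infer_instance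

def pvWitness_classify_result : List String × String := (["P", "C", "R"], "C")

def Spec_classify_result (materials : List String) (result_quality : String) (out : String) : Prop := out = classify_result_alt materials result_quality
instance (materials : List String) (result_quality : String) (out : String) : Decidable (Spec_classify_result materials result_quality out) := by unfold Spec_classify_result; infer_instance

-- ===== CLAIM (what is proved, stated in full; the proofs are below) =====
def Claim_equal_classify_result : Prop := ∀ (materials : List String) (result_quality : String), Dom_classify_result materials result_quality → Pre_classify_result materials result_quality → Spec_classify_result materials result_quality (classify_result materials result_quality)

-- ===== LEMMAS AND PROOFS =====

theorem scoresOf?_eq_some (l : List String) (h : ∀ q ∈ l, (QUALITY_SCORES.get? q).isSome = true) :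
    scoresOf? l = some (l.map (fun q => (QUALITY_SCORES.get? q).getD 0)) := by
  induction l with
  | nil => rfl
  | cons a t ih =>
    have ha := h a (by simp)
    obtain ⟨v, hv⟩ := Option.isSome_iff_exists.mp ha
    simp [scoresOf?, hv, ih (fun q hq => h q (by simp [hq]))]

theorem foldl_min_spec (l : List Int) (a : Int) :
    (l.foldl (fun m e => if e < m then e else m) a) ∈ a :: l ∧
    ∀ y ∈ a :: l, l.foldl (fun m e => if e < m then e else m) a ≤ y := by
  induction l generalizing a with
  | nil => simp
  | cons b t ih =>
    obtain ⟨hm, hle⟩ := ih (if b < a then b else a)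
    constructor
    · simp only [List.foldl_cons]
      rcases List.mem_cons.mp hm with h | h
      · rw [h]; by_cases hba : b < a <;> simp [hba]
      · simp [h]
    · intro y hy
      simp only [List.foldl_cons]
      have hbase := hle (if b < a then b else a) (List.mem_cons_self)
      rcases List.mem_cons.mp hy with rfl | hy'
      · refine le_trans hbase ?_; split_ifs <;> omega
      · rcases List.mem_cons.mp hy' with rfl | hy''
        · refine le_trans hbase ?_; split_ifs <;> omega
        · exact hle y (List.mem_cons_of_mem _ hy'')

theorem foldl_max_spec (l : List Int) (a : Int) :
    (l.foldl (fun m e => if e > m then e else m) a) ∈ a :: l ∧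
    ∀ y ∈ a :: l, y ≤ l.foldl (fun m e => if e > m then e else m) a := by
  induction l generalizing a with
  | nil => simp
  | cons b t ih =>
    obtain ⟨hm, hle⟩ := ih (if b > a then b else a)
    constructor
    · simp only [List.foldl_cons]
      rcases List.mem_cons.mp hm with h | h
      · rw [h]; by_cases hba : b > a <;> simp [hba]
      · simp [h]
    · intro y hy
      simp only [List.foldl_cons]
      have hbase := hle (if b > a then b else a) (List.mem_cons_self)
      rcases List.mem_cons.mp hy with rfl | hy'
      · refine le_trans ?_ hbase; split_ifs <;> omega
      · rcases List.mem_cons.mp hy' with rfl | hy''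
        · refine le_trans ?_ hbase; split_ifs <;> omega
        · exact hle y (List.mem_cons_of_mem _ hy'')

theorem pairwise_le_getLast (l : List Int) (h : l.Pairwise (· ≤ ·)) (hne : l ≠ []) :
    ∀ y ∈ l, y ≤ l.getLast hne := by
  induction l with
  | nil => simp at hne
  | cons a t ih =>
    intro y hy
    rcases List.pairwise_cons.mp h with ⟨ha, ht⟩
    cases t with
    | nil => simp at hy; simp [hy, List.getLast]
    | cons b t' =>
      rw [List.getLast_cons (by simp)]
      rcases List.mem_cons.mp hy with rfl | hy'
      · exact le_trans (ha b (by simp)) (ih ht (by simp) b (by simp))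
      · exact ih ht (by simp) y hy'

theorem index?_sorted_eq_countP (l : List Int) (r : Int) (h : l.Pairwise (· ≤ ·)) (hr : r ∈ l) :
    PySem.List.index? l r = some (l.countP (fun x => decide (x < r))) := by
  induction l with
  | nil => simp at hr
  | cons a t ih =>
    rcases List.pairwise_cons.mp h with ⟨ha, ht⟩
    by_cases hae : a = r
    · subst hae
      rw [PySem.List.index?_cons_self]
      have : t.countP (fun x => decide (x < a)) = 0 := by
        rw [List.countP_eq_zero]
        intro x hx
        simp only [decide_eq_true_eq]
        exact not_lt.mpr (ha x hx)
      simp [this]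
    · have hrt : r ∈ t := by rcases List.mem_cons.mp hr with h' | h' <;> [exact absurd h'.symm hae; exact h']
      rw [PySem.List.index?_cons_of_ne t hae, ih ht hrt]
      have har : a < r := lt_of_le_of_ne (ha r hrt) hae
      simp [har]

-- the four independent accumulators of B's single loop, separated
theorem foldl_quad (l : List Int) (r : Int) (a b c : Int) (d : Bool) :
    l.foldl (fun (st : Int × Int × Int × Bool) s =>
        (if s < st.1 then s else st.1,
         if s > st.2.1 then s else st.2.1,
         if s < r then st.2.2.1 + 1 else st.2.2.1,
         if s == r then true else st.2.2.2)) (a, b, c, d) =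
      (l.foldl (fun m e => if e < m then e else m) a,
       l.foldl (fun m e => if e > m then e else m) b,
       c + (l.countP (fun x => decide (x < r)) : Int),
       d || l.any (fun x => x == r)) := by
  induction l generalizing a b c d with
  | nil => simp
  | cons x t ih =>
    simp only [List.foldl_cons, ih, List.countP_cons, List.any_cons, Prod.mk.injEq, true_and]
    constructor
    · by_cases hx : x < r <;> simp [hx] <;> omega
    · by_cases hx : (x == r) = true <;> simp [hx]

theorem classify_result_spec' (materials : List String) (result_quality : String)
    (hpre : Pre_classify_result materials result_quality) :
    classify_result materials result_quality = classify_result_alt materials result_quality := by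
  obtain ⟨hne, hmat, hres⟩ := hpre
  obtain ⟨r, hr⟩ := Option.isSome_iff_exists.mp hres
  have hs := scoresOf?_eq_some materials hmat
  set scores := materials.map (fun q => (QUALITY_SCORES.get? q).getD 0) with hscores
  have hsne : scores ≠ [] := by simp [hscores, hne]
  obtain ⟨s0, rest, hcons⟩ := List.exists_cons_of_ne_nil hsne
  -- A-side: the sorted list
  set values := PySem.List.sorted scores (fun x => x) false with hvalues
  have hvne : values ≠ [] := by
    rw [hvalues, Ne, PySem.List.sorted_eq_nil_iff]; exact hsne
  obtain ⟨h0, tl, hvcons⟩ := List.exists_cons_of_ne_nil hvne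
  have hperm : values.Perm scores := PySem.List.sorted_perm scores (fun x => x) false
  have hpw : values.Pairwise (· ≤ ·) := by
    have := PySem.List.sorted_pairwise (xs := scores) (key := fun x => x)
    simpa [hvalues] using this
  -- A's min_val = B's min accumulator
  have hminB := foldl_min_spec scores s0
  have hminA : ∀ y ∈ scores, h0 ≤ y := by
    intro y hy
    have := PySem.List.key_head_sorted_le (xs := scores) (key := fun x => x) (hvalues ▸ hvcons)
    simpa using this y hy
  have hmin_eq : h0 = scores.foldl (fun m e => if e < m then e else m) s0 := by
    have h1 : scores.foldl (fun m e => if e < m then e else m) s0 ∈ scores := by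
      rcases List.mem_cons.mp hminB.1 with h | h
      · rw [h, hcons]; simp
      · exact h
    have h2 : h0 ∈ scores := hperm.mem_iff.mp (by simp [hvcons])
    exact le_antisymm (hminA _ h1) (hminB.2 _ (by simp [h2]))
  -- A's max_val = B's max accumulator
  have hmaxB := foldl_max_spec scores s0
  have hmaxA : ∀ y ∈ scores, y ≤ values.getLast hvne :=
    fun y hy => pairwise_le_getLast values hpw hvne y (hperm.mem_iff.mpr hy)
  have hmax_eq : values.getLast hvne = scores.foldl (fun m e => if e > m then e else m) s0 := by
    have h1 : scores.foldl (fun m e => if e > m then e else m) s0 ∈ scores := by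
      rcases List.mem_cons.mp hmaxB.1 with h | h
      · rw [h, hcons]; simp
      · exact h
    have h2 : values.getLast hvne ∈ scores := hperm.mem_iff.mp (List.getLast_mem hvne)
    exact le_antisymm (hmaxB.2 _ (by simp [h2])) (hmaxA _ h1)
  -- membership and count transfer
  have hmemv : ∀ x : Int, x ∈ values ↔ x ∈ scores := fun x => hperm.mem_iff
  have hcount : values.countP (fun x => decide (x < r)) = scores.countP (fun x => decide (x < r)) :=
    hperm.countP_eq _
  -- unfold both ports
  rw [classify_result, classify_result_alt, hs, hcons]
  simp only [← hcons, ← hvalues]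
  rw [hvcons]
  rw [PySem.List.pyGet?_zero_cons h0 tl]
  rw [show PySem.List.pyGet? (h0 :: tl) (-1) = (h0 :: tl).getLast? from PySem.List.pyGet?_neg_one _]
  rw [List.getLast?_eq_some_getLast (by simp), hr]
  dsimp only
  rw [foldl_quad]
  have hgl : (h0 :: tl).getLast (by simp) = values.getLast hvne := by
    congr 1 <;> rw [hvcons]
  rw [hgl, ← hvcons, ← hmax_eq, ← hmin_eq]
  dsimp only
  rw [zero_add, Bool.false_or]
  -- both if-chains now test identical scrutinees
  by_cases hbmax : (r == values.getLast hvne) = true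
  · rw [if_pos hbmax, if_pos hbmax]
  · rw [if_neg hbmax, if_neg hbmax]
    by_cases hball : (r == h0 && materials.all fun q => q == "P") = true
    · rw [if_pos hball, if_pos hball]
    · rw [if_neg hball, if_neg hball]
      by_cases hbmin : (r == h0) = true
      · rw [if_pos hbmin, if_pos hbmin]
      · rw [if_neg hbmin, if_neg hbmin]
        by_cases hfound : r ∈ scores
        · have hcont : values.contains r = true := by
            simpa [List.contains_iff_mem] using (hmemv r).mpr hfound
          have hidx := index?_sorted_eq_countP values r hpw ((hmemv r).mpr hfound)
          have hany : scores.any (fun x => x == r) = true := by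
            simp only [List.any_eq_true, beq_iff_eq]
            exact ⟨r, hfound, rfl⟩
          rw [if_pos hcont, hidx, hany, if_pos rfl, Option.getD_some, hcount]
          have hne1 : ((scores.countP (fun x => decide (x < r)) : Int) != -1) = true := by
            simp only [bne_iff_ne, ne_eq]
            omega
          rw [if_pos hne1]
        · have hrv : r ∉ values := fun h => hfound ((hmemv r).mp h)
          have hcont : values.contains r = false := by
            simpa [List.contains_iff_mem] using hrv
          have hany : scores.any (fun x => x == r) = false := by
            simp only [List.any_eq_false, beq_iff_eq]
            intro x hx hxr; exact hfound (hxr ▸ hx)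
          rw [hcont, hany]
          simp

-- ===== VERDICT (by name: the statement is the Claim_ definition above) =====
theorem classify_result_spec : Claim_equal_classify_result := by
  intro materials result_quality _ hpre
  exact classify_result_spec' materials result_quality hpre
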